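-- pv_equiv track=rewrite | github.com/will-j-wright/openvmm | repo_support/investigate_ci.py | _pick_best_run
-- ===== SOURCE A (Python) =====
-- _CI_WORKFLOW_NAMES = ["OpenVMM PR", "[Optional] OpenVMM Release PR", "OpenVMM Docs PR"]
--
-- def _pick_best_run(runs: list[dict]) -> dict | None:
--     """Pick the most relevant run from a list, preferring failed CI runs."""
--     if not runs:
--         return None
--
--     # Conclusions that indicate a non-successful run.
--     _failure_conclusions = {"failure", "timed_out", "cancelled", "startup_failure", "action_required"}
--
--     # First pass: prefer a failed run from a known CI workflow.
--     for name in _CI_WORKFLOW_NAMES: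
--         for r in runs:
--             if r.get("name") == name and r.get("conclusion") in _failure_conclusions:
--                 return r
--
--     # Second pass: any run from a known CI workflow.
--     for name in _CI_WORKFLOW_NAMES:
--         for r in runs:
--             if r.get("name") == name:
--                 return r
--
--     # Fallback: first run.
--     return runs[0]
-- ===== SOURCE B (Python) =====
-- _CI_WORKFLOW_NAMES = ["OpenVMM PR", "[Optional] OpenVMM Release PR", "OpenVMM Docs PR"]
--
-- def _pick_best_run(runs: list[dict]) -> dict | None:
--     """Pick the most relevant run: single pass tracking the minimal priority key."""
--     if not runs:
--         return None
--     failure_conclusions = {"failure", "timed_out", "cancelled", "startup_failure", "action_required"}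
--     prio = {name: idx for idx, name in enumerate(_CI_WORKFLOW_NAMES)}
--     best = None
--     best_key = None
--     for i, r in enumerate(runs):
--         ni = prio.get(r.get("name"))
--         if ni is None:
--             continue
--         key = (0 if r.get("conclusion") in failure_conclusions else 1, ni, i)
--         if best_key is None or key < best_key:
--             best_key = key
--             best = r
--     return best if best is not None else runs[0]
-- ===== Notes on version B (the rewrite author's own statement) =====
-- stated objective: alternative
-- what changed: Replaces the two phase-ordered passes over the workflow-name list with nested rescans of runs by a single pass over runs that tracks the run with the lexicographically smallest (failed?, name-priority, index) key.
import Mathlib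
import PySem

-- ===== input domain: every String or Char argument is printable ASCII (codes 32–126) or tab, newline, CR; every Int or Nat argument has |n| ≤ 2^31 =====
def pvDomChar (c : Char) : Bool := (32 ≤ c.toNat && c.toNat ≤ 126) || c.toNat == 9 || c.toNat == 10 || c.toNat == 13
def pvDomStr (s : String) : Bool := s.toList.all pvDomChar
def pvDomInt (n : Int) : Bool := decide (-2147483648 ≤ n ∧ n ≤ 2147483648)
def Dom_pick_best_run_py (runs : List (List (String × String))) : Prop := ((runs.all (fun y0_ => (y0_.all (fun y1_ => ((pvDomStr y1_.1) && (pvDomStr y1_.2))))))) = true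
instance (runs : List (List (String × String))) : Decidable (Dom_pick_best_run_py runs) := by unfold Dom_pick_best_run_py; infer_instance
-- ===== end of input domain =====

-- B replaces A's six phase-ordered rescans of `runs` by one pass tracking the minimal
-- (failed?, name-priority, index) key; same return value, no speed claim.

-- ===== PORT A =====
def pvNames : List String := ["OpenVMM PR", "[Optional] OpenVMM Release PR", "OpenVMM Docs PR"]
def pvFailureConclusions : List String := ["failure", "timed_out", "cancelled", "startup_failure", "action_required"]
-- r.get(k) on a dict (association list, first match)
def pvGet (r : List (String × String)) (k : String) : Option String := (r.find? (fun p => p.1 == k)).map (·.2)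
-- r.get("conclusion") in _failure_conclusions  (None is in no string set)
def pvIsFailure (c : Option String) : Bool := match c with | some s => pvFailureConclusions.contains s | none => false
def pvFailPred (name : String) (r : List (String × String)) : Bool := (pvGet r "name" == some name) && pvIsFailure (pvGet r "conclusion")
def pvAnyPred (name : String) (r : List (String × String)) : Bool := pvGet r "name" == some name

def pick_best_run_py (runs : List (List (String × String))) : Option (List (String × String)) :=
  match runs with
  | [] => none
  | r0 :: _ =>
    -- first pass: failed run of a known CI workflow, in workflow-name order
    match pvNames.findSome? (fun n => runs.find? (pvFailPred n)) with
    | some r => some r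
    | none =>
      -- second pass: any run of a known CI workflow
      match pvNames.findSome? (fun n => runs.find? (pvAnyPred n)) with
      | some r => some r
      | none => some r0

-- ===== PORT B =====
-- prio = {name: idx for idx, name in enumerate(_CI_WORKFLOW_NAMES)}
def pvPrio : List (String × Int) := (PySem.List.enumerate pvNames 0).map (fun p => (p.2, p.1))
-- tuple comparison key < best_key (lexicographic on the Int triple)
def pvKeyLt (a b : Int × Int × Int) : Bool :=
  a.1 < b.1 || (a.1 == b.1 && (a.2.1 < b.2.1 || (a.2.1 == b.2.1 && a.2.2 < b.2.2)))
-- the key of run r at index i, none when its name is not a known workflow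
def pvKeyOf (i : Int) (r : List (String × String)) : Option (Int × Int × Int) :=
  match pvGet r "name" with
  | none => none
  | some nm =>
    match (pvPrio.find? (fun p => p.1 == nm)).map (·.2) with
    | none => none
    | some ni => some ((if pvIsFailure (pvGet r "conclusion") then 0 else 1), ni, i)
-- loop body: keep the state unless this run has a strictly smaller key (or there is none yet)
def pvStep (st : Option ((Int × Int × Int) × List (String × String))) (p : Int × List (String × String)) :
    Option ((Int × Int × Int) × List (String × String)) :=
  match pvKeyOf p.1 p.2 with
  | none => st
  | some k =>
    match st with
    | none => some (k, p.2)
    | some (bk, br) => if pvKeyLt k bk then some (k, p.2) else some (bk, br)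

def pick_best_run_py_alt (runs : List (List (String × String))) : Option (List (String × String)) :=
  match runs with
  | [] => none
  | r0 :: _ =>
    match (PySem.List.enumerate runs 0).foldl pvStep none with
    | some (_, r) => some r
    | none => some r0

-- ===== PRECONDITION & SPEC =====
def Spec_pick_best_run_py (runs : List (List (String × String))) (out : Option (List (String × String))) : Prop := out = pick_best_run_py_alt runs
instance (runs : List (List (String × String))) (out : Option (List (String × String))) : Decidable (Spec_pick_best_run_py runs out) := by unfold Spec_pick_best_run_py; infer_instance

-- ===== CLAIM (what is proved, stated in full; the proofs are below) =====
def Claim_equal_pick_best_run_py : Prop := ∀ (runs : List (List (String × String))), Dom_pick_best_run_py runs → Spec_pick_best_run_py runs (pick_best_run_py runs)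

-- ===== LEMMAS AND PROOFS =====

-- A's cascade of searches, indexed: j = 0..2 failed pass, 3..5 any pass
def pvPredI (j : Int) : List (String × String) → Bool :=
  if j = 0 then pvFailPred "OpenVMM PR"
  else if j = 1 then pvFailPred "[Optional] OpenVMM Release PR"
  else if j = 2 then pvFailPred "OpenVMM Docs PR"
  else if j = 3 then pvAnyPred "OpenVMM PR"
  else if j = 4 then pvAnyPred "[Optional] OpenVMM Release PR"
  else if j = 5 then pvAnyPred "OpenVMM Docs PR"
  else fun _ => false

-- recursive characterisation of B's fold
def pvBRec (n : Int) : List (List (String × String)) → Option ((Int × Int × Int) × List (String × String))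
  | [] => none
  | x :: xs =>
    match pvKeyOf n x with
    | none => pvBRec (n + 1) xs
    | some k =>
      match pvBRec (n + 1) xs with
      | none => some (k, x)
      | some (k', r') => if pvKeyLt k' k then some (k', r') else some (k, x)

def pvComb (st b : Option ((Int × Int × Int) × List (String × String))) :
    Option ((Int × Int × Int) × List (String × String)) :=
  match st with
  | none => b
  | some s =>
    match b with
    | none => some s
    | some (k', r') => if pvKeyLt k' s.1 then some (k', r') else some s

lemma pvComb_assoc (st b1 b2 : Option ((Int × Int × Int) × List (String × String))) :
    pvComb (pvComb st b1) b2 = pvComb st (pvComb b1 b2) := by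
  rcases st with _ | ⟨⟨⟨s1, s2, s3⟩, sr⟩⟩ <;> rcases b1 with _ | ⟨⟨⟨a1, a2, a3⟩, ar⟩⟩ <;>
    rcases b2 with _ | ⟨⟨⟨c1, c2, c3⟩, cr⟩⟩ <;>
    simp only [pvComb, pvKeyLt, Bool.or_eq_true, Bool.and_eq_true, decide_eq_true_eq,
      beq_iff_eq] <;> split_ifs <;>
      first
        | rfl
        | (simp only []
           split_ifs <;> first | rfl | (exfalso; omega))

lemma pvFold_char (xs : List (List (String × String))) :
    ∀ (n : Int) st, (PySem.List.enumerate xs n).foldl pvStep st = pvComb st (pvBRec n xs) := by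
  induction xs with
  | nil => intro n st; simp only [PySem.List.enumerate_nil, List.foldl_nil, pvBRec]; cases st <;> rfl
  | cons x xs ih =>
    intro n st
    rw [PySem.List.enumerate_cons, List.foldl_cons, ih]
    have hstep : pvStep st (n, x) = pvComb st (match pvKeyOf n x with | none => none | some k => some (k, x)) := by
      simp only [pvStep, pvComb]
      cases pvKeyOf n x <;> cases st <;> rfl
    rw [hstep, pvComb_assoc]
    congr 1
    simp only [pvBRec, pvComb]
    cases pvKeyOf n x
    · rfl
    · cases pvBRec (n + 1) xs <;> rfl

lemma pvKeyOf_shift (n c : Int) (x : List (String × String)) :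
    pvKeyOf (n + c) x = (pvKeyOf n x).map (fun k => (k.1, k.2.1, k.2.2 + c)) := by
  simp only [pvKeyOf]
  cases h1 : pvGet x "name" with
  | none => rfl
  | some nm =>
    simp only []
    cases (pvPrio.find? (fun p => p.1 == nm)).map (·.2) <;> rfl

lemma pvBRec_shift (xs : List (List (String × String))) :
    ∀ (n c : Int), pvBRec (n + c) xs = (pvBRec n xs).map (fun q => ((q.1.1, q.1.2.1, q.1.2.2 + c), q.2)) := by
  induction xs with
  | nil => intro n c; rfl
  | cons x xs ih =>
    intro n c
    have hn : (n + 1) + c = (n + c) + 1 := by ring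
    simp only [pvBRec, pvKeyOf_shift n c x, ← hn, ih (n + 1) c]
    cases pvKeyOf n x with
    | none => rfl
    | some k =>
      cases pvBRec (n + 1) xs with
      | none => rfl
      | some q =>
        rcases k with ⟨k1, k2, k3⟩
        rcases q with ⟨⟨q1, q2, q3⟩, qr⟩
        have hlt : pvKeyLt (q1, q2, q3 + c) (k1, k2, k3 + c) = pvKeyLt (q1, q2, q3) (k1, k2, k3) := by
          rw [Bool.eq_iff_iff]
          simp only [pvKeyLt, Bool.or_eq_true, Bool.and_eq_true, decide_eq_true_eq, beq_iff_eq]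
          omega
        simp only [Option.map_some]
        rw [hlt]
        split_ifs <;> rfl

lemma pvPrio_eq : pvPrio = [("OpenVMM PR", 0), ("[Optional] OpenVMM Release PR", 1), ("OpenVMM Docs PR", 2)] := by
  rfl

-- the shape of a run's key
lemma pvKey_char {n : Int} {x : List (String × String)} {f a i : Int}
    (h : pvKeyOf n x = some (f, a, i)) :
    ∃ nm, pvGet x "name" = some nm ∧ i = n ∧
      f = (if pvIsFailure (pvGet x "conclusion") then 0 else 1) ∧
      ((nm = "OpenVMM PR" ∧ a = 0) ∨ (nm = "[Optional] OpenVMM Release PR" ∧ a = 1) ∨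
        (nm = "OpenVMM Docs PR" ∧ a = 2)) := by
  rcases h1 : pvGet x "name" with _ | nm
  · simp [pvKeyOf, h1] at h
  · refine ⟨nm, rfl, ?_⟩
    simp only [pvKeyOf, h1, pvPrio_eq, List.find?] at h
    by_cases e1 : ("OpenVMM PR" : String) = nm
    · simp [← e1] at h
      exact ⟨h.2.2.symm, h.1.symm, Or.inl ⟨e1.symm, h.2.1.symm⟩⟩
    · by_cases e2 : ("[Optional] OpenVMM Release PR" : String) = nm
      · simp [← e2] at h
        exact ⟨h.2.2.symm, h.1.symm, Or.inr (Or.inl ⟨e2.symm, h.2.1.symm⟩)⟩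
      · by_cases e3 : ("OpenVMM Docs PR" : String) = nm
        · simp [← e3] at h
          exact ⟨h.2.2.symm, h.1.symm, Or.inr (Or.inr ⟨e3.symm, h.2.1.symm⟩)⟩
        · have b1 : (("OpenVMM PR" : String) == nm) = false := by simp [e1]
          have b2 : (("[Optional] OpenVMM Release PR" : String) == nm) = false := by simp [e2]
          have b3 : (("OpenVMM Docs PR" : String) == nm) = false := by simp [e3]
          simp [b1, b2, b3] at h

-- which cascade predicates a keyed run satisfies
lemma pvPredI_of_key {n : Int} {x : List (String × String)} {f a i : Int}
    (h : pvKeyOf n x = some (f, a, i)) (j : Int) :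
    pvPredI j x = (decide (j = f * 3 + a) || (decide (f = 0) && decide (j = a + 3))) := by
  rcases pvKey_char h with ⟨nm, hget, _, hf, hcase⟩
  have hsplit : (f = 0 ∧ pvIsFailure (pvGet x "conclusion") = true) ∨
      (f = 1 ∧ pvIsFailure (pvGet x "conclusion") = false) := by
    by_cases hfail : pvIsFailure (pvGet x "conclusion") = true
    · exact Or.inl ⟨by rw [hf, if_pos hfail], hfail⟩
    · exact Or.inr ⟨by rw [hf, if_neg hfail], by simpa using hfail⟩
  rcases hsplit with ⟨rfl, hfail⟩ | ⟨rfl, hfail⟩ <;>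
    rcases hcase with ⟨hnm, rfl⟩ | ⟨hnm, rfl⟩ | ⟨hnm, rfl⟩ <;> subst hnm <;>
    simp only [pvPredI] <;>
    rw [Bool.eq_iff_iff] <;> split_ifs <;> simp_all [pvFailPred, pvAnyPred]

-- a run without a key satisfies no cascade predicate
lemma pvPredI_of_nokey {n : Int} {x : List (String × String)}
    (h : pvKeyOf n x = none) (j : Int) : pvPredI j x = false := by
  rcases h1 : pvGet x "name" with _ | nm
  · simp only [pvPredI]
    split_ifs <;> simp [pvFailPred, pvAnyPred, h1]
  · simp only [pvKeyOf, h1, pvPrio_eq, List.find?] at h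
    by_cases e1 : ("OpenVMM PR" : String) = nm
    · simp [← e1] at h
    · by_cases e2 : ("[Optional] OpenVMM Release PR" : String) = nm
      · simp [← e2] at h
      · by_cases e3 : ("OpenVMM Docs PR" : String) = nm
        · simp [← e3] at h
        · simp only [pvPredI]
          have b1 : (some nm == some ("OpenVMM PR" : String)) = false := by
            simp [Ne.symm e1]
          have b2 : (some nm == some ("[Optional] OpenVMM Release PR" : String)) = false := by
            simp [Ne.symm e2]
          have b3 : (some nm == some ("OpenVMM Docs PR" : String)) = false := by
            simp [Ne.symm e3]
          split_ifs <;> simp [pvFailPred, pvAnyPred, h1, b1, b2, b3]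

-- key components are in range and the index is ≥ the offset
lemma pvKey_bounds (xs : List (List (String × String))) :
    ∀ (n : Int) {f a i : Int} {r : List (String × String)},
      pvBRec n xs = some ((f, a, i), r) → (f = 0 ∨ f = 1) ∧ (a = 0 ∨ a = 1 ∨ a = 2) ∧ n ≤ i := by
  induction xs with
  | nil => intro n f a i r h; simp [pvBRec] at h
  | cons x xs ih =>
    intro n f a i r h
    simp only [pvBRec] at h
    cases hk : pvKeyOf n x with
    | none =>
      rw [hk] at h
      rcases ih (n + 1) h with ⟨h1, h2, h3⟩
      exact ⟨h1, h2, by omega⟩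
    | some k =>
      rw [hk] at h
      rcases k with ⟨kf, ka, ki⟩
      rcases pvKey_char hk with ⟨nm, _, hi, hf, hcase⟩
      cases hr : pvBRec (n + 1) xs with
      | none =>
        rw [hr] at h
        dsimp only at h
        simp only [Option.some_inj, Prod.mk.injEq] at h
        rcases h with ⟨⟨rfl, rfl, rfl⟩, rfl⟩
        refine ⟨?_, ?_, by omega⟩
        · split_ifs at hf <;> omega
        · rcases hcase with ⟨_, ha⟩ | ⟨_, ha⟩ | ⟨_, ha⟩ <;> omega
      | some q =>
        rw [hr] at h
        rcases q with ⟨⟨qf, qa, qi⟩, qr⟩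
        rcases ih (n + 1) hr with ⟨h1, h2, h3⟩
        dsimp only at h
        split_ifs at h <;> simp only [Option.some_inj, Prod.mk.injEq] at h <;>
          rcases h with ⟨⟨rfl, rfl, rfl⟩, rfl⟩
        · exact ⟨h1, h2, by omega⟩
        · refine ⟨?_, ?_, by omega⟩
          · split_ifs at hf <;> omega
          · rcases hcase with ⟨_, ha⟩ | ⟨_, ha⟩ | ⟨_, ha⟩ <;> omega

-- the invariant: B's tracked best is exactly what A's indexed cascade finds
def pvInv (xs : List (List (String × String))) : Prop :=
  match pvBRec 0 xs with
  | none => ∀ j : Int, xs.find? (pvPredI j) = none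
  | some ((f, a, _), r) =>
      xs.find? (pvPredI (f * 3 + a)) = some r ∧
      ∀ j : Int, j < f * 3 + a → xs.find? (pvPredI j) = none

lemma pvInv_holds (xs : List (List (String × String))) : pvInv xs := by
  induction xs with
  | nil => simp [pvInv, pvBRec]
  | cons x xs ih
  =>
    have hsh : pvBRec 1 xs = (pvBRec 0 xs).map (fun q => ((q.1.1, q.1.2.1, q.1.2.2 + 1), q.2)) := by
      have := pvBRec_shift xs 0 1
      norm_num at this
      exact this
    unfold pvInv at ih ⊢
    simp only [pvBRec]
    cases hk : pvKeyOf 0 x with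
    | none =>
      have hpx := pvPredI_of_nokey hk
      cases hb : pvBRec 0 xs with
      | none =>
        rw [show (0 : Int) + 1 = 1 by norm_num, hsh, hb]
        simp only [Option.map_none]
        rw [hb] at ih; dsimp only at ih
        intro j
        rw [List.find?_cons_of_neg (by simp [hpx j]), ih j]
      | some q =>
        rcases q with ⟨⟨f, a, i⟩, r⟩
        rw [show (0 : Int) + 1 = 1 by norm_num, hsh, hb]
        simp only [Option.map_some]
        rw [hb] at ih; dsimp only at ih
        refine ⟨?_, ?_⟩
        · rw [List.find?_cons_of_neg (by simp [hpx _]), ih.1]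
        · intro j hj
          rw [List.find?_cons_of_neg (by simp [hpx j]), ih.2 j hj]
    | some k =>
      rcases k with ⟨f, a, i⟩
      have hpx := pvPredI_of_key hk
      have hfa : (f = 0 ∨ f = 1) ∧ (a = 0 ∨ a = 1 ∨ a = 2) ∧ i = 0 := by
        rcases pvKey_char hk with ⟨nm, _, hi, hf, hcase⟩
        refine ⟨by split_ifs at hf <;> omega, by rcases hcase with ⟨_, ha⟩ | ⟨_, ha⟩ | ⟨_, ha⟩ <;> omega, hi⟩
      have hx_self : pvPredI (f * 3 + a) x = true := by
        rw [hpx (f * 3 + a)]; simp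
      have hx_lt : ∀ j : Int, j < f * 3 + a → pvPredI j x = false := by
        intro j hj
        rw [hpx j]
        rcases hfa.1 with rfl | rfl <;> simp <;> omega
      cases hb : pvBRec 0 xs with
      | none =>
        rw [show (0 : Int) + 1 = 1 by norm_num, hsh, hb]
        simp only [Option.map_none]
        rw [hb] at ih; dsimp only at ih
        refine ⟨List.find?_cons_of_pos hx_self, ?_⟩
        intro j hj
        rw [List.find?_cons_of_neg (by simp [hx_lt j hj]), ih j]
      | some q =>
        rcases q with ⟨⟨f', a', i'⟩, r'⟩
        have hfa' := pvKey_bounds xs 0 hb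
        rw [show (0 : Int) + 1 = 1 by norm_num, hsh, hb]
        simp only [Option.map_some]
        rw [hb] at ih; dsimp only at ih
        by_cases hlt : pvKeyLt (f', a', i' + 1) (f, a, i) = true
        · have hjlt : f' * 3 + a' < f * 3 + a := by
            simp only [pvKeyLt, Bool.or_eq_true, Bool.and_eq_true, decide_eq_true_eq,
              beq_iff_eq] at hlt
            rcases hfa.1 with rfl | rfl <;> rcases hfa'.1 with rfl | rfl <;>
              rcases hfa.2.1 with rfl | rfl | rfl <;> rcases hfa'.2.1 with rfl | rfl | rfl <;>
              omega
          rw [if_pos hlt]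
          refine ⟨?_, ?_⟩
          · rw [List.find?_cons_of_neg (by simp [hx_lt _ hjlt]), ih.1]
          · intro j hj
            rw [List.find?_cons_of_neg (by simp [hx_lt j (by omega)]), ih.2 j hj]
        · have hjge : f * 3 + a ≤ f' * 3 + a' := by
            simp only [pvKeyLt, Bool.or_eq_true, Bool.and_eq_true, decide_eq_true_eq,
              beq_iff_eq] at hlt
            rcases hfa.1 with rfl | rfl <;> rcases hfa'.1 with rfl | rfl <;>
              rcases hfa.2.1 with rfl | rfl | rfl <;> rcases hfa'.2.1 with rfl | rfl | rfl <;>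
              omega
          rw [if_neg hlt]
          refine ⟨List.find?_cons_of_pos hx_self, ?_⟩
          intro j hj
          rw [List.find?_cons_of_neg (by simp [hx_lt j hj]), ih.2 j (by omega)]

-- the six cascade searches of A, written with pvPredI
lemma pvPredI_0 : pvPredI 0 = pvFailPred "OpenVMM PR" := by norm_num [pvPredI]
lemma pvPredI_1 : pvPredI 1 = pvFailPred "[Optional] OpenVMM Release PR" := by norm_num [pvPredI]
lemma pvPredI_2 : pvPredI 2 = pvFailPred "OpenVMM Docs PR" := by norm_num [pvPredI]
lemma pvPredI_3 : pvPredI 3 = pvAnyPred "OpenVMM PR" := by norm_num [pvPredI]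
lemma pvPredI_4 : pvPredI 4 = pvAnyPred "[Optional] OpenVMM Release PR" := by norm_num [pvPredI]
lemma pvPredI_5 : pvPredI 5 = pvAnyPred "OpenVMM Docs PR" := by norm_num [pvPredI]

-- ===== VERDICT (by name: the statement is the Claim_ definition above) =====
theorem pick_best_run_py_spec : Claim_equal_pick_best_run_py := by
  unfold Claim_equal_pick_best_run_py
  intro runs _
  unfold Spec_pick_best_run_py
  cases runs with
  | nil => rfl
  | cons r0 rest =>
    have hinv := pvInv_holds (r0 :: rest)
    unfold pvInv at hinv
    simp only [pick_best_run_py, pick_best_run_py_alt, pvNames, List.findSome?,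
      pvFold_char (r0 :: rest) 0 none, pvComb]
    cases hb : pvBRec 0 (r0 :: rest) with
    | none =>
      rw [hb] at hinv; dsimp only at hinv
      rw [← pvPredI_0, ← pvPredI_1, ← pvPredI_2, ← pvPredI_3, ← pvPredI_4, ← pvPredI_5]
      rw [hinv 0, hinv 1, hinv 2, hinv 3, hinv 4, hinv 5]
    | some q =>
      rcases q with ⟨⟨f, a, i⟩, r⟩
      rw [hb] at hinv; dsimp only at hinv
      have hfa := pvKey_bounds (r0 :: rest) 0 hb
      rw [← pvPredI_0, ← pvPredI_1, ← pvPredI_2, ← pvPredI_3, ← pvPredI_4, ← pvPredI_5]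
      obtain ⟨h1, h2⟩ := hinv
      rcases hfa.1 with rfl | rfl <;> rcases hfa.2.1 with rfl | rfl | rfl
      · rw [show (0:Int)*3+0 = 0 by norm_num] at h1
        rw [h1]
      · rw [show (0:Int)*3+1 = 1 by norm_num] at h1
        rw [h2 0 (by norm_num), h1]
      · rw [show (0:Int)*3+2 = 2 by norm_num] at h1
        rw [h2 0 (by norm_num), h2 1 (by norm_num), h1]
      · rw [show (1:Int)*3+0 = 3 by norm_num] at h1
        rw [h2 0 (by norm_num), h2 1 (by norm_num), h2 2 (by norm_num), h1]
      · rw [show (1:Int)*3+1 = 4 by norm_num] at h1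
        rw [h2 0 (by norm_num), h2 1 (by norm_num), h2 2 (by norm_num), h2 3 (by norm_num), h1]
      · rw [show (1:Int)*3+2 = 5 by norm_num] at h1
        rw [h2 0 (by norm_num), h2 1 (by norm_num), h2 2 (by norm_num), h2 3 (by norm_num),
          h2 4 (by norm_num), h1]
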